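-- pv_equiv track=rewrite | github.com/jpgdesign/Virtual-Child-Companion-AI-for-Proactive-Elderly-Care | integrated_dqn_train.py | _index_to_state
-- ===== SOURCE A (Python) =====
-- from typing import List, Dict, Any
--
-- def _index_to_state(index: int) -> List[int]:
--     """將索引轉換為狀態向量"""
--     if index < 0 or index >= 32:
--         return [0, 0, 0, 0, 0]
--
--     state = []
--     for i in range(5):
--         bit = (index >> (4 - i)) & 1
--         state.append(bit)
--
--     return state
-- ===== SOURCE B (Python) =====
-- def _index_to_state(index: int):
--     if index < 0 or index >= 32:
--         return [0, 0, 0, 0, 0]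
--     return [int(c) for c in format(index, '05b')]
-- ===== Notes on version B (the rewrite author's own statement) =====
-- stated objective: idiomatic
-- what changed: B formats the whole index as a zero-padded 5-bit binary string and maps each character to an int, instead of A's loop extracting each bit with shift-and-mask.
import Mathlib
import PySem

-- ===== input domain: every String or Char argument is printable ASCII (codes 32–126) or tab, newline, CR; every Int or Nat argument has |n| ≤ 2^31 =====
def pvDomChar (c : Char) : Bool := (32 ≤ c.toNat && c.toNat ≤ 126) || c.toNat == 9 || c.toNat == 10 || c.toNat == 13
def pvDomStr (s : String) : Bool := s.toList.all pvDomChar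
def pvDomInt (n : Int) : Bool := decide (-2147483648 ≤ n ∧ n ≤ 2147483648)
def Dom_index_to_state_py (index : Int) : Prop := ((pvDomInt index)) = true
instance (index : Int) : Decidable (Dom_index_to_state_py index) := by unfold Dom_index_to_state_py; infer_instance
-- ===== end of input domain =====

-- B formats the index as a zero-padded 5-bit binary string and maps each character to an int,
-- instead of A's shift-and-mask loop; objective: idiomatic, same cost.

-- ===== PORT A =====
def index_to_state_py (index : Int) : List Int :=
  if index < 0 ∨ index ≥ 32 then [0, 0, 0, 0, 0]
  else
    (PySem.List.pyRange 0 5 1).foldl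
      (fun state i => state ++ [PySem.Int.band (index >>> (4 - i).toNat) 1]) []

-- ===== PORT B =====
-- binary digits of n, most significant first (what format(n,'b') produces for n ≥ 0);
-- structural recursion on a fuel that starts at n (n/2 < n, so n steps always suffice)
def pvBinCharsAux : Nat → Nat → List Char
  | 0, n => [Char.ofNat (n % 2 + 48)]
  | fuel + 1, n =>
    if n < 2 then [Char.ofNat (n + 48)]
    else pvBinCharsAux fuel (n / 2) ++ [Char.ofNat (n % 2 + 48)]

def pvBinChars (n : Nat) : List Char := pvBinCharsAux n n

def index_to_state_py_alt (index : Int) : List Int :=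
  if index < 0 ∨ index ≥ 32 then [0, 0, 0, 0, 0]
  else
    -- format(index, '05b'): binary digits left-padded with '0' to width 5
    let s := pvBinChars index.toNat
    let padded := List.replicate (5 - s.length) '0' ++ s
    padded.map (fun c => ((c.toNat : Int) - 48))

-- ===== PRECONDITION & SPEC =====
def Spec_index_to_state_py (index : Int) (out : List Int) : Prop := out = index_to_state_py_alt index
instance (index : Int) (out : List Int) : Decidable (Spec_index_to_state_py index out) := by unfold Spec_index_to_state_py; infer_instance

-- ===== CLAIM (what is proved, stated in full; the proofs are below) =====
def Claim_equal_index_to_state_py : Prop := ∀ (index : Int), Dom_index_to_state_py index → Spec_index_to_state_py index (index_to_state_py index)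

-- ===== LEMMAS AND PROOFS =====

-- ===== VERDICT (by name: the statement is the Claim_ definition above) =====
theorem index_to_state_py_spec : Claim_equal_index_to_state_py := by
  intro index _
  unfold Spec_index_to_state_py
  by_cases h : index < 0 ∨ index ≥ 32
  · simp [index_to_state_py, index_to_state_py_alt, h]
  · have h0 : ¬ index < 0 := fun h0 => h (Or.inl h0)
    have h1 : index < 32 := by
      by_contra h1; exact h (Or.inr (by omega))
    have h0' : 0 ≤ index := by omega
    interval_cases index <;> decide
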